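-- pv_equiv track=rewrite | github.com/Siunami/wikipedia-pro | server/app.py | is_allowed_wikimedia_host
-- ===== SOURCE A (Python) =====
-- _WIKIMEDIA_APEX = (
--     "wikipedia.org",
--     "wiktionary.org",
--     "wikidata.org",
--     "wikimedia.org",
--     "wikibooks.org",
--     "wikiquote.org",
--     "wikiversity.org",
--     "wikivoyage.org",
--     "wikisource.org",
--     "wikinews.org",
--     "mediawiki.org",
-- )
--
-- def is_allowed_wikimedia_host(host: str) -> bool:
--     if not host:
--         return False
--     h = host.lower().strip()
--     # Strip port if present
--     if ":" in h:
--         h = h.split(":", 1)[0]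
--     if h in ("commons.wikimedia.org", "upload.wikimedia.org"):
--         return True
--     for apex in _WIKIMEDIA_APEX:
--         if h == apex or h.endswith("." + apex):
--             return True
--     return False
-- ===== SOURCE B (Python) =====
-- _WIKIMEDIA_APEX_SET = frozenset((
--     "wikipedia.org",
--     "wiktionary.org",
--     "wikidata.org",
--     "wikimedia.org",
--     "wikibooks.org",
--     "wikiquote.org",
--     "wikiversity.org",
--     "wikivoyage.org",
--     "wikisource.org",
--     "wikinews.org",
--     "mediawiki.org",
-- ))
--
-- def is_allowed_wikimedia_host(host: str) -> bool:
--     h = host.lower().strip().partition(":")[0]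
--     # single pass: keep the current label and the previous one; at the end the
--     # key "prev.cur" (or just "cur" if at most one label) is the apex candidate
--     prev, cur = None, ""
--     for c in h:
--         if c == ".":
--             prev, cur = cur, ""
--         else:
--             cur += c
--     key = cur if prev is None else prev + "." + cur
--     return key in _WIKIMEDIA_APEX_SET
-- ===== Notes on version B (the rewrite author's own statement) =====
-- stated objective: alternative
-- what changed: Replaces A's scan over the apex tuple with == / .endswith suffix tests per apex (plus two special-cased hosts and an explicit empty-host guard) by a single character pass that keeps only the last two dot-separated labels of the host and tests that one key for membership in a frozenset of apex domains.
import Mathlib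
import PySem

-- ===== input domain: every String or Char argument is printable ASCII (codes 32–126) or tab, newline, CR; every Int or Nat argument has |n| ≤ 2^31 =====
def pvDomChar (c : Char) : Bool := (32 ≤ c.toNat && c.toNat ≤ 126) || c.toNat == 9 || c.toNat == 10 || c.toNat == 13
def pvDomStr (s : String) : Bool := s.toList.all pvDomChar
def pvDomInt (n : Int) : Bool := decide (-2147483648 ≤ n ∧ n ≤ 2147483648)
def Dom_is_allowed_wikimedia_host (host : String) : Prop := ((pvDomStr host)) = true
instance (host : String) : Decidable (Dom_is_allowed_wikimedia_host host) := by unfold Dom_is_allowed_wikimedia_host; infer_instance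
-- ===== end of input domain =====

-- B replaces A's apex-scanning loop (and its two special-cased hosts) by a single character
-- pass that keeps only the last two dot-separated labels, testing the resulting "prev.cur"
-- key for membership in a set of apex domains (idiomatic/alternative, one pass over the host).

-- ===== PORT A =====
def wikimediaApex : List (List Char) :=
  ["wikipedia.org".toList, "wiktionary.org".toList, "wikidata.org".toList,
   "wikimedia.org".toList, "wikibooks.org".toList, "wikiquote.org".toList,
   "wikiversity.org".toList, "wikivoyage.org".toList, "wikisource.org".toList,
   "wikinews.org".toList, "mediawiki.org".toList]

def is_allowed_wikimedia_host (host : String) : Bool :=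
  if host.toList == [] then false
  else
    let h1 := PySem.Chars.strip (PySem.Chars.lower host.toList)
    -- h.split(":", 1)[0]: the split result is always nonempty, so [0] is its head
    let h := if PySem.Chars.isIn [':'] h1 then (PySem.Chars.splitOnMax h1 [':'] 1).headD [] else h1
    if h == "commons.wikimedia.org".toList || h == "upload.wikimedia.org".toList then true
    else wikimediaApex.any (fun apex => h == apex || PySem.Chars.endswith h ('.' :: apex))

-- ===== PORT B =====
def wikimediaApexSet : PySem.Set (List Char) :=
  PySem.Set.ofList
    ["wikipedia.org".toList, "wiktionary.org".toList, "wikidata.org".toList,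
     "wikimedia.org".toList, "wikibooks.org".toList, "wikiquote.org".toList,
     "wikiversity.org".toList, "wikivoyage.org".toList, "wikisource.org".toList,
     "wikinews.org".toList, "mediawiki.org".toList]

-- one step of B's loop: state is (previous label if any, current label)
def twoLabelStep (pc : Option (List Char) × List Char) (c : Char) : Option (List Char) × List Char :=
  if c = '.' then (some pc.2, []) else (pc.1, pc.2 ++ [c])

def is_allowed_wikimedia_host_alt (host : String) : Bool :=
  -- h.partition(":")[0] is exactly the chars before the first ':', i.e. takeWhile (· ≠ ':')
  let h := (PySem.Chars.strip (PySem.Chars.lower host.toList)).takeWhile (fun c => !(c == ':'))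
  let st := h.foldl twoLabelStep (none, [])
  let key := match st.1 with
    | none => st.2
    | some p => p ++ '.' :: st.2
  PySem.Set.contains wikimediaApexSet key

-- ===== PRECONDITION & SPEC =====
def Spec_is_allowed_wikimedia_host (host : String) (out : Bool) : Prop := out = is_allowed_wikimedia_host_alt host
instance (host : String) (out : Bool) : Decidable (Spec_is_allowed_wikimedia_host host out) := by unfold Spec_is_allowed_wikimedia_host; infer_instance

-- ===== CLAIM (what is proved, stated in full; the proofs are below) =====
def Claim_equal_is_allowed_wikimedia_host : Prop := ∀ (host : String), Dom_is_allowed_wikimedia_host host → Spec_is_allowed_wikimedia_host host (is_allowed_wikimedia_host host)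

-- ===== LEMMAS AND PROOFS =====

-- ---- splitOnMax h [':'] 1 head = takeWhile (no colon) ----

lemma splitOnMax_go_zero (fuel : Nat) (l : List Char) (acc : List (List Char)) :
    PySem.Chars.splitOnMax.go [':'] (fuel + 1) 0 l [] acc = (l :: acc).reverse := by
  cases l <;> rw [PySem.Chars.splitOnMax.go.eq_def] <;> simp

lemma splitOnMax_go_one (fuel : Nat) :
    ∀ (l cur : List Char), l.length < fuel →
      (PySem.Chars.splitOnMax.go [':'] fuel 1 l cur []).headD []
        = cur.reverse ++ l.takeWhile (fun c => !(c == ':')) := by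
  induction fuel with
  | zero => intro l cur h; omega
  | succ f ih =>
    intro l cur h
    cases l with
    | nil => rw [PySem.Chars.splitOnMax.go.eq_def]; simp
    | cons c rest =>
      rw [PySem.Chars.splitOnMax.go.eq_def]
      simp only [List.isPrefixOf, List.length_cons] at *
      by_cases hc : c = ':'
      · subst hc
        simp only [BEq.rfl, Bool.true_and, if_pos, if_neg (by omega : ¬ (1 : Nat) = 0),
          List.drop_succ_cons, List.takeWhile_cons]
        obtain ⟨f', hf'⟩ : ∃ f', f = f' + 1 := ⟨f - 1, by omega⟩
        subst hf'
        rw [show (1 : Nat) - 1 = 0 from rfl, splitOnMax_go_zero]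
        simp
      · rw [if_neg (by omega : ¬ (1 : Nat) = 0),
           if_neg (by simp; exact fun h' => hc h'.symm)]
        rw [ih rest (c :: cur) (by omega)]
        simp [hc]

lemma port_strip_eq (s : List Char) :
    (if PySem.Chars.isIn [':'] s then (PySem.Chars.splitOnMax s [':'] 1).headD [] else s)
      = s.takeWhile (fun c => !(c == ':')) := by
  by_cases hin : PySem.Chars.isIn [':'] s
  · rw [if_pos hin]
    unfold PySem.Chars.splitOnMax
    rw [if_neg (by norm_num)]
    have := splitOnMax_go_one (s.length + 1) s [] (by omega)
    simpa using this
  · rw [if_neg hin]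
    have hnm : ':' ∉ s := by
      intro hmem
      obtain ⟨t, u, htu⟩ := List.append_of_mem hmem
      exact absurd ((PySem.Chars.isIn_iff_infix _ _).mpr ⟨t, u, by simp [htu]⟩) hin
    rw [List.takeWhile_eq_self_iff.mpr]
    intro c hc
    simp only [Bool.not_eq_true', beq_eq_false_iff_ne]
    exact fun h' => hnm (h' ▸ hc)

-- ---- a reference splitter and the key of the last two labels ----

def mySplit (pre : List Char) : List Char → List (List Char)
  | [] => [pre]
  | c :: rest => if c = '.' then pre :: mySplit [] rest else mySplit (pre ++ [c]) rest

lemma mySplit_ne_nil (l pre : List Char) : mySplit pre l ≠ [] := by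
  induction l generalizing pre with
  | nil => simp [mySplit]
  | cons c rest ih => by_cases hc : c = '.' <;> simp [mySplit, hc, ih]

lemma join_mySplit (l : List Char) : ∀ pre, PySem.Chars.join ['.'] (mySplit pre l) = pre ++ l := by
  induction l with
  | nil => intro pre; simp [mySplit, PySem.Chars.join_singleton]
  | cons c rest ih =>
    intro pre
    by_cases hc : c = '.'
    · subst hc
      simp only [mySplit, reduceIte]
      obtain ⟨q, qs, hq⟩ : ∃ q qs, mySplit [] rest = q :: qs := by
        cases hmb : mySplit [] rest with
        | nil => exact absurd hmb (mySplit_ne_nil rest [])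
        | cons q qs => exact ⟨q, qs, rfl⟩
      rw [hq, PySem.Chars.join_cons_cons, ← hq, ih []]
      simp
    · simp only [mySplit, if_neg hc, ih]
      simp

lemma mySplit_append (xs : List Char) : ∀ pre ys,
    mySplit pre (xs ++ '.' :: ys) = mySplit pre xs ++ mySplit [] ys := by
  induction xs with
  | nil => intro pre ys; simp [mySplit]
  | cons c rest ih =>
    intro pre ys
    by_cases hc : c = '.' <;> simp [mySplit, hc, ih]

lemma mySplit_nodot (l : List Char) : ∀ pre, '.' ∉ l → mySplit pre l = [pre ++ l] := by
  induction l with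
  | nil => intro pre _; simp [mySplit]
  | cons c rest ih =>
    intro pre hn
    have hc : c ≠ '.' := fun h => hn (h ▸ List.mem_cons_self ..)
    rw [mySplit, if_neg hc, ih _ (fun h => hn (List.mem_cons_of_mem _ h))]
    simp

lemma join_append (xs : List (List Char)) : ∀ ys, xs ≠ [] → ys ≠ [] →
    PySem.Chars.join ['.'] (xs ++ ys)
      = PySem.Chars.join ['.'] xs ++ '.' :: PySem.Chars.join ['.'] ys := by
  induction xs with
  | nil => intro ys h _; exact absurd rfl h
  | cons x xs' ih =>
    intro ys _ hy
    cases xs' with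
    | nil =>
      cases ys with
      | nil => exact absurd rfl hy
      | cons y ys' => simp [PySem.Chars.join_cons_cons, PySem.Chars.join_singleton]
    | cons x2 xs'' =>
      rw [show (x :: x2 :: xs'' : List (List Char)) ++ ys = x :: x2 :: (xs'' ++ ys) from rfl]
      rw [PySem.Chars.join_cons_cons]
      rw [show (x2 :: (xs'' ++ ys) : List (List Char)) = (x2 :: xs'') ++ ys from rfl]
      rw [ih ys (by simp) hy]
      rw [PySem.Chars.join_cons_cons]
      simp

def keyOf (h : List Char) : List Char :=
  PySem.Chars.join ['.'] ((mySplit [] h).drop ((mySplit [] h).length - 2))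

lemma keyOf_cases (h k : List Char) (hk : keyOf h = k) : h = k ∨ ('.' :: k) <:+ h := by
  unfold keyOf at hk
  by_cases hlen : (mySplit [] h).length ≤ 2
  · left
    rw [Nat.sub_eq_zero_of_le hlen, List.drop_zero, join_mySplit] at hk
    simpa using hk
  · right
    rw [not_le] at hlen
    set ps := mySplit [] h with hps
    have hdec : List.take (ps.length - 2) ps ++ List.drop (ps.length - 2) ps = ps :=
      List.take_append_drop _ _
    have hdl : (List.drop (ps.length - 2) ps).length = 2 := by
      rw [List.length_drop]; omega
    obtain ⟨a, b, hab⟩ : ∃ a b, List.drop (ps.length - 2) ps = [a, b] := by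
      cases hd : List.drop (ps.length - 2) ps with
      | nil => rw [hd] at hdl; simp at hdl
      | cons a t =>
        cases t with
        | nil => rw [hd] at hdl; simp at hdl
        | cons b t2 =>
          cases t2 with
          | nil => exact ⟨a, b, rfl⟩
          | cons => rw [hd] at hdl; simp at hdl
    have htk : List.take (ps.length - 2) ps ≠ [] := by
      intro hnil
      have := congrArg List.length hnil
      simp [List.length_take] at this
      omega
    have hh : h = PySem.Chars.join ['.'] ps := by rw [hps, join_mySplit]; simp
    rw [← hdec, join_append _ _ htk (by rw [hab]; simp), hab] at hh
    rw [hab] at hk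
    rw [hk] at hh
    exact ⟨_, hh.symm⟩

lemma keyOf_of_suffix (h a b : List Char) (hna : '.' ∉ a) (hnb : '.' ∉ b)
    (hs : ('.' :: (a ++ '.' :: b)) <:+ h) : keyOf h = a ++ '.' :: b := by
  obtain ⟨p, hp⟩ := hs
  subst hp
  unfold keyOf
  rw [mySplit_append p [] (a ++ '.' :: b), mySplit_append a [] b,
      mySplit_nodot a [] hna, mySplit_nodot b [] hnb]
  simp only [List.nil_append]
  rw [show (mySplit [] p ++ ([a] ++ [b])).length - 2 = (mySplit [] p).length by simp]
  rw [show mySplit [] p ++ ([a] ++ [b]) = mySplit [] p ++ [a, b] from rfl]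
  rw [List.drop_left]
  rw [PySem.Chars.join_cons_cons, PySem.Chars.join_singleton]
  simp

-- ---- B's fold computes keyOf ----

def keyAux (o : Option (List Char)) (ls : List (List Char)) : List Char :=
  if ls.length ≤ 1 then
    (match o with | none => ls.headD [] | some p => p ++ '.' :: ls.headD [])
  else PySem.Chars.join ['.'] (ls.drop (ls.length - 2))

lemma keyAux_push (o : Option (List Char)) (cur : List Char) (ls : List (List Char))
    (hne : ls ≠ []) : keyAux (some cur) ls = keyAux o (cur :: ls) := by
  obtain ⟨x, t, rfl⟩ : ∃ x t, ls = x :: t := by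
    cases ls with
    | nil => exact absurd rfl hne
    | cons x t => exact ⟨x, t, rfl⟩
  cases t with
  | nil =>
    simp [keyAux, PySem.Chars.join_cons_cons, PySem.Chars.join_singleton]
  | cons y t2 =>
    simp only [keyAux, List.length_cons]
    rw [if_neg (by omega), if_neg (by omega)]
    rw [show t2.length + 1 + 1 + 1 - 2 = (t2.length + 1 + 1 - 2) + 1 by omega]
    rw [List.drop_succ_cons]

lemma fold_key (l : List Char) : ∀ (o : Option (List Char)) (cur : List Char),
    (match (l.foldl twoLabelStep (o, cur)).1 with
     | none => (l.foldl twoLabelStep (o, cur)).2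
     | some p => p ++ '.' :: (l.foldl twoLabelStep (o, cur)).2)
      = keyAux o (mySplit cur l) := by
  induction l with
  | nil =>
    intro o cur
    cases o <;> simp [mySplit, keyAux]
  | cons c rest ih =>
    intro o cur
    by_cases hc : c = '.'
    · subst hc
      rw [List.foldl_cons, show twoLabelStep (o, cur) '.' = (some cur, []) from rfl]
      rw [ih (some cur) [], show mySplit cur ('.' :: rest) = cur :: mySplit [] rest
            by simp [mySplit]]
      exact keyAux_push o cur _ (mySplit_ne_nil rest [])
    · rw [List.foldl_cons, show twoLabelStep (o, cur) c = (o, cur ++ [c])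
            by simp [twoLabelStep, hc]]
      rw [ih o (cur ++ [c]), show mySplit cur (c :: rest) = mySplit (cur ++ [c]) rest
            by simp [mySplit, hc]]

lemma keyAux_none (h : List Char) : keyAux none (mySplit [] h) = keyOf h := by
  unfold keyAux keyOf
  by_cases hl : (mySplit [] h).length ≤ 1
  · rw [if_pos hl]
    obtain ⟨x, hx⟩ : ∃ x, mySplit [] h = [x] := by
      cases hm : mySplit [] h with
      | nil => exact absurd hm (mySplit_ne_nil h [])
      | cons a t =>
        cases t with
        | nil => exact ⟨a, rfl⟩
        | cons => rw [hm] at hl; simp at hl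
    rw [hx]
    simp [PySem.Chars.join_singleton]
  · rw [if_neg hl]

-- ---- main comparison on the stripped host ----

lemma any_true_of_suffix (h apex : List Char) (hm : apex ∈ wikimediaApex)
    (hx : h = apex ∨ ('.' :: apex) <:+ h) :
    (wikimediaApex.any (fun apex => h == apex || PySem.Chars.endswith h ('.' :: apex))) = true := by
  rw [List.any_eq_true]
  refine ⟨apex, hm, ?_⟩
  rcases hx with rfl | hs
  · simp
  · simp [PySem.Chars.endswith_iff, hs]

lemma check_eq (h : List Char) :
    PySem.Set.contains wikimediaApexSet (keyOf h)
    = (if h == "commons.wikimedia.org".toList || h == "upload.wikimedia.org".toList then true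
       else wikimediaApex.any (fun apex => h == apex || PySem.Chars.endswith h ('.' :: apex))) := by
  rw [Bool.eq_iff_iff]
  constructor
  · -- B true → A true
    intro hb
    have hk : keyOf h ∈ wikimediaApex := by
      have := (PySem.Set.contains_iff _ _).mp hb
      simp only [wikimediaApexSet, PySem.Set.mem_ofList] at this
      simpa [wikimediaApex] using this
    have hcase := keyOf_cases h (keyOf h) rfl
    have hany := any_true_of_suffix h (keyOf h) hk (by tauto)
    split
    · rfl
    · exact hany
  · -- A true → B true
    intro ha
    split at ha
    · -- special-cased hosts
      rename_i hsp
      rw [Bool.or_eq_true, beq_iff_eq, beq_iff_eq] at hsp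
      rcases hsp with rfl | rfl <;> decide
    · rw [List.any_eq_true] at ha
      obtain ⟨apex, hm, hx⟩ := ha
      rw [Bool.or_eq_true, beq_iff_eq] at hx
      rcases hx with rfl | hend
      · -- h equals the apex itself
        fin_cases hm <;> decide
      · -- h ends with "." + apex
        have hsuf := (PySem.Chars.endswith_iff _ _).mp hend
        fin_cases hm
        · rw [keyOf_of_suffix h "wikipedia".toList "org".toList (by decide) (by decide) hsuf]; decide
        · rw [keyOf_of_suffix h "wiktionary".toList "org".toList (by decide) (by decide) hsuf]; decide
        · rw [keyOf_of_suffix h "wikidata".toList "org".toList (by decide) (by decide) hsuf]; decide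
        · rw [keyOf_of_suffix h "wikimedia".toList "org".toList (by decide) (by decide) hsuf]; decide
        · rw [keyOf_of_suffix h "wikibooks".toList "org".toList (by decide) (by decide) hsuf]; decide
        · rw [keyOf_of_suffix h "wikiquote".toList "org".toList (by decide) (by decide) hsuf]; decide
        · rw [keyOf_of_suffix h "wikiversity".toList "org".toList (by decide) (by decide) hsuf]; decide
        · rw [keyOf_of_suffix h "wikivoyage".toList "org".toList (by decide) (by decide) hsuf]; decide
        · rw [keyOf_of_suffix h "wikisource".toList "org".toList (by decide) (by decide) hsuf]; decide
        · rw [keyOf_of_suffix h "wikinews".toList "org".toList (by decide) (by decide) hsuf]; decide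
        · rw [keyOf_of_suffix h "mediawiki".toList "org".toList (by decide) (by decide) hsuf]; decide

-- ===== VERDICT (by name: the statement is the Claim_ definition above) =====
theorem is_allowed_wikimedia_host_spec : Claim_equal_is_allowed_wikimedia_host := by
  intro host _
  unfold Spec_is_allowed_wikimedia_host
  unfold is_allowed_wikimedia_host is_allowed_wikimedia_host_alt
  by_cases he : host.toList == []
  · rw [if_pos he]
    rw [beq_iff_eq] at he
    rw [he]
    decide
  · rw [if_neg he]
    simp only [port_strip_eq]
    generalize ((PySem.Chars.strip (PySem.Chars.lower host.toList)).takeWhile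
        (fun c => !(c == ':'))) = h
    rw [fold_key h none [], keyAux_none]
    exact (check_eq h).symm
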